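-- pv_equiv track=rewrite | github.com/zyf0717/fit-diff | shared/utils/fit_pairing.py | build_time_bounds
-- ===== SOURCE A (Python) =====
-- EMPTY_TIME_BOUNDS = {
--     "start_epoch": None,
--     "end_epoch": None,
--     "duration_seconds": None,
-- }
--
-- def build_time_bounds(timestamps):
--     """Build time-bound metadata from a collection of epoch timestamps."""
--     if timestamps is None:
--         return EMPTY_TIME_BOUNDS.copy()
--
--     timestamp_set = {int(timestamp) for timestamp in timestamps}
--     if not timestamp_set:
--         return EMPTY_TIME_BOUNDS.copy()
--
--     start_epoch = min(timestamp_set)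
--     end_epoch = max(timestamp_set)
--     return {
--         "start_epoch": start_epoch,
--         "end_epoch": end_epoch,
--         "duration_seconds": max(end_epoch - start_epoch, 0),
--     }
-- ===== SOURCE B (Python) =====
-- EMPTY_TIME_BOUNDS = {
--     "start_epoch": None,
--     "end_epoch": None,
--     "duration_seconds": None,
-- }
--
-- def build_time_bounds(timestamps):
--     """Build time-bound metadata from a collection of epoch timestamps."""
--     if timestamps is None:
--         return EMPTY_TIME_BOUNDS.copy()
--     bounds = None
--     for t in timestamps:
--         v = int(t)
--         if bounds is None:
--             bounds = (v, v)
--         else: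
--             lo, hi = bounds
--             bounds = (min(lo, v), max(hi, v))
--     if bounds is None:
--         return EMPTY_TIME_BOUNDS.copy()
--     lo, hi = bounds
--     return {
--         "start_epoch": lo,
--         "end_epoch": hi,
--         "duration_seconds": max(hi - lo, 0),
--     }
-- ===== Notes on version B (the rewrite author's own statement) =====
-- stated objective: simpler
-- what changed: Replaced building an intermediate set and scanning it twice with min() and max() by one single-pass fold that maintains running (lo, hi) bounds and a None sentinel for emptiness.
import Mathlib
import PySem

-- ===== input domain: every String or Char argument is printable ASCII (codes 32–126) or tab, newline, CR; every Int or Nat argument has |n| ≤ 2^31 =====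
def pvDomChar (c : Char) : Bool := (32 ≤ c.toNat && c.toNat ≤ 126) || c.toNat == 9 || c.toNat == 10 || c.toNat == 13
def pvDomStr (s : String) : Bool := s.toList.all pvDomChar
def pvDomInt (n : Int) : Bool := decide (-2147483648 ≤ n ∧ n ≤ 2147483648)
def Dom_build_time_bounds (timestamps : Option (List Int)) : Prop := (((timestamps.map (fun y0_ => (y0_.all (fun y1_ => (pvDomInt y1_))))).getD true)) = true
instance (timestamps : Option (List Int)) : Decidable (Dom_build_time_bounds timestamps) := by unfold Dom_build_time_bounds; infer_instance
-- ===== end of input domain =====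

-- B replaces A's intermediate set plus min()/max() scans by one single-pass fold of running (lo, hi) bounds; objective: simpler.

-- ===== PORT A =====
def pvEmptyBounds : List (String × Option Int) :=
  [("start_epoch", none), ("end_epoch", none), ("duration_seconds", none)]

def build_time_bounds (timestamps : Option (List Int)) : List (String × Option Int) :=
  match timestamps with
  | none => pvEmptyBounds
  | some ts =>
    let timestamp_set : PySem.Set Int := PySem.Set.ofList ts
    if timestamp_set = [] then pvEmptyBounds
    else
      match PySem.List.min? timestamp_set (fun x => x), PySem.List.max? timestamp_set (fun x => x) with
      | some start_epoch, some end_epoch =>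
        [("start_epoch", some start_epoch), ("end_epoch", some end_epoch),
         ("duration_seconds", some (max (end_epoch - start_epoch) 0))]
      | _, _ => pvEmptyBounds  -- unreachable: the set is nonempty

-- ===== PORT B =====
def pvStep (acc : Option (Int × Int)) (v : Int) : Option (Int × Int) :=
  match acc with
  | none => some (v, v)
  | some (lo, hi) => some (min lo v, max hi v)

def build_time_bounds_alt (timestamps : Option (List Int)) : List (String × Option Int) :=
  match timestamps with
  | none => pvEmptyBounds
  | some ts =>
    match ts.foldl pvStep none with
    | none => pvEmptyBounds
    | some (lo, hi) =>
      [("start_epoch", some lo), ("end_epoch", some hi),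
       ("duration_seconds", some (max (hi - lo) 0))]

-- ===== PRECONDITION & SPEC =====
def Spec_build_time_bounds (timestamps : Option (List Int)) (out : List (String × Option Int)) : Prop := out = build_time_bounds_alt timestamps
instance (timestamps : Option (List Int)) (out : List (String × Option Int)) : Decidable (Spec_build_time_bounds timestamps out) := by unfold Spec_build_time_bounds; infer_instance

-- ===== CLAIM (what is proved, stated in full; the proofs are below) =====
def Claim_equal_build_time_bounds : Prop := ∀ (timestamps : Option (List Int)), Dom_build_time_bounds timestamps → Spec_build_time_bounds timestamps (build_time_bounds timestamps)

-- ===== LEMMAS AND PROOFS =====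

theorem pv_fold_some (t : List Int) (lo hi : Int) :
    t.foldl pvStep (some (lo, hi)) = some (t.foldl min lo, t.foldl max hi) := by
  induction t generalizing lo hi with
  | nil => rfl
  | cons x t ih => simp [List.foldl, pvStep, ih]

theorem pv_fold_cons (x : Int) (t : List Int) :
    (x :: t).foldl pvStep none = some (t.foldl min x, t.foldl max x) := by
  simp [List.foldl, pvStep, pv_fold_some]

theorem pv_min_set (ts : List Int) :
    PySem.List.min? (PySem.Set.ofList ts) (fun x => x) = PySem.List.min? ts (fun x => x) := by
  match hts : ts with
  | [] => rfl
  | x :: t =>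
    match hs : PySem.Set.ofList (x :: t) with
    | [] =>
      exfalso
      have : x ∈ PySem.Set.ofList (x :: t) := (PySem.Set.mem_ofList _ _).2 List.mem_cons_self
      simp [hs] at this
    | y :: u =>
      have h1 : PySem.List.min? (y :: u) (fun x => x) = some (u.foldl min y) :=
        PySem.List.min?_id_cons y u
      have hm : u.foldl min y ∈ PySem.Set.ofList (x :: t) := by
        rw [hs]; exact PySem.List.min?_mem h1
      have hm' : u.foldl min y ∈ x :: t := (PySem.Set.mem_ofList _ _).1 hm
      have hmin : ∀ z ∈ x :: t, u.foldl min y ≤ z := by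
        intro z hz
        have := PySem.List.min?_isMin h1 z (by rw [← hs] at *; exact (PySem.Set.mem_ofList _ _).2 hz)
        simpa using this
      have h2 : PySem.List.min? (x :: t) (fun x => x) = some (t.foldl min x) :=
        PySem.List.min?_id_cons x t
      have hm2 : t.foldl min x ∈ x :: t := PySem.List.min?_mem h2
      have hmin2 : ∀ z ∈ x :: t, t.foldl min x ≤ z := fun z hz => by
        simpa using PySem.List.min?_isMin h2 z hz
      have heq : u.foldl min y = t.foldl min x :=
        le_antisymm (hmin _ hm2) (hmin2 _ hm')
      rw [h1, h2, heq]

theorem pv_max_set (ts : List Int) :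
    PySem.List.max? (PySem.Set.ofList ts) (fun x => x) = PySem.List.max? ts (fun x => x) := by
  match hts : ts with
  | [] => rfl
  | x :: t =>
    match hs : PySem.Set.ofList (x :: t) with
    | [] =>
      exfalso
      have : x ∈ PySem.Set.ofList (x :: t) := (PySem.Set.mem_ofList _ _).2 List.mem_cons_self
      simp [hs] at this
    | y :: u =>
      have h1 : PySem.List.max? (y :: u) (fun x => x) = some (u.foldl max y) :=
        PySem.List.max?_id_cons y u
      have hm : u.foldl max y ∈ PySem.Set.ofList (x :: t) := by
        rw [hs]; exact PySem.List.max?_mem h1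
      have hm' : u.foldl max y ∈ x :: t := (PySem.Set.mem_ofList _ _).1 hm
      have hmax : ∀ z ∈ x :: t, z ≤ u.foldl max y := by
        intro z hz
        have := PySem.List.max?_isMax h1 z (by rw [← hs] at *; exact (PySem.Set.mem_ofList _ _).2 hz)
        simpa using this
      have h2 : PySem.List.max? (x :: t) (fun x => x) = some (t.foldl max x) :=
        PySem.List.max?_id_cons x t
      have hm2 : t.foldl max x ∈ x :: t := PySem.List.max?_mem h2
      have hmax2 : ∀ z ∈ x :: t, z ≤ t.foldl max x := fun z hz => by
        simpa using PySem.List.max?_isMax h2 z hz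
      have heq : u.foldl max y = t.foldl max x :=
        le_antisymm (hmax2 _ hm') (hmax _ hm2)
      rw [h1, h2, heq]

-- ===== VERDICT (by name: the statement is the Claim_ definition above) =====
theorem build_time_bounds_spec : Claim_equal_build_time_bounds := by
  intro timestamps _
  unfold Spec_build_time_bounds build_time_bounds build_time_bounds_alt
  cases timestamps with
  | none => rfl
  | some ts =>
    cases ts with
    | nil => rfl
    | cons x t =>
      dsimp only
      have hne : PySem.Set.ofList (x :: t) ≠ [] := by
        intro h
        have : x ∈ PySem.Set.ofList (x :: t) := by
          rw [PySem.Set.mem_ofList]; exact List.mem_cons_self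
        simp [h] at this
      rw [if_neg hne, pv_min_set, pv_max_set, PySem.List.min?_id_cons, PySem.List.max?_id_cons,
        pv_fold_cons]
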